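-- pv_equiv track=rewrite | github.com/ziyuli/paddle_in_example | part4 easy tutorials/eager_image_captioning/train.py | text_tokenizer
-- ===== SOURCE A (Python) =====
-- import string
--
-- def text_tokenizer(text, max_words, reserve):
--     freq = dict()
--     punc = string.punctuation
--     punc = punc.replace('<', '').replace('>', '')
--     words = text.translate(str.maketrans('', '', punc))
--     words = words.replace('\n', ' ')
--     words = words.split(' ')
--
--     for word in words:
--         if isinstance(word, str):
--             word_low = word.lower()
--             if word_low in freq:
--                 freq[word_low] += 1
--             else:
--                 freq[word_low] = 1
--
--     freq_sorted = sorted(freq.items(), key=lambda kv:(kv[1], kv[0]), reverse=True)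
--
--     word2idx, idx2word = dict(), dict()
--     count = reserve
--     for key, value in freq_sorted:
--         if count < max_words:
--             word2idx[key] = count
--             idx2word[count] = key
--             count += 1
--
--     return word2idx, idx2word
-- ===== SOURCE B (Python) =====
-- import string
--
--
-- def text_tokenizer(text, max_words, reserve):
--     # one streaming pass: tokenize, lowercase and count in a single loop,
--     # then slice the sorted items and enumerate them into the two index maps
--     drop = set(string.punctuation) - {'<', '>'}
--     freq = {}
--     buf = []
--     for ch in text:
--         if ch in drop:
--             continue
--         if ch == ' ' or ch == '\n':
--             w = ''.join(buf)
--             freq[w] = freq.get(w, 0) + 1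
--             buf = []
--         else:
--             buf.append(ch.lower())
--     w = ''.join(buf)
--     freq[w] = freq.get(w, 0) + 1
--
--     top = sorted(freq.items(), key=lambda kv: (kv[1], kv[0]), reverse=True)
--     top = top[:max(0, max_words - reserve)]
--
--     word2idx = {w: reserve + i for i, (w, _) in enumerate(top)}
--     idx2word = {reserve + i: w for i, (w, _) in enumerate(top)}
--     return word2idx, idx2word
-- ===== Notes on version B (the rewrite author's own statement) =====
-- stated objective: alternative
-- what changed: A's four passes (translate to strip punctuation, replace newlines, split(' '), then a counting loop) are fused into one streaming character pass that tokenizes, lowercases and counts in a single loop, and A's truncating counter loop over the full sorted list is replaced by slicing the top max(0, max_words - reserve) items and enumerating them into the two index dicts.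
import Mathlib
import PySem

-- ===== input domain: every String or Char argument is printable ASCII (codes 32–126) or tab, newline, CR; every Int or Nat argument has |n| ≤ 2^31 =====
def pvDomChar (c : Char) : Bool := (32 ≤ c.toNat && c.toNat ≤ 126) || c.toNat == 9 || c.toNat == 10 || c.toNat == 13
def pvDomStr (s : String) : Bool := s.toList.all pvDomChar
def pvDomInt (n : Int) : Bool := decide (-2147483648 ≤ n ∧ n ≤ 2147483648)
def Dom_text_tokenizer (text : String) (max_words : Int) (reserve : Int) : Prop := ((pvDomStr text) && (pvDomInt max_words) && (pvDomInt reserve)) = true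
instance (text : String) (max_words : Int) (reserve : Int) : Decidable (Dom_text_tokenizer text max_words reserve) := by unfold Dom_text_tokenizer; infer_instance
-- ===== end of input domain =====

-- B replaces A's translate/replace/split passes and truncating counter loop by one streaming
-- tokenize-and-count pass plus a slice-and-enumerate indexer (objective: alternative, same cost).

-- string.punctuation (module constant used by both versions)
def pvPunc : String := "!\"#$%&'()*+,-./:;<=>?@[\\]^_`{|}~"

-- ===== PORT A =====
-- punc = string.punctuation.replace('<','').replace('>','')
def pvPuncA : String := PySem.Str.replace (PySem.Str.replace pvPunc "<" "") ">" ""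

-- loop body of A's frequency count ('if word_low in freq: … else: …')
def pvStepA (d : PySem.Dict (List Char) Int) (w : List Char) : PySem.Dict (List Char) Int :=
  let wl := PySem.Chars.lower w
  if d.contains wl then d.insert wl (d.getD wl 0 + 1) else d.insert wl 1

-- loop body of A's index assignment (state = (word2idx, idx2word, count))
def pvAssignA (max_words : Int)
    (s : PySem.Dict String Int × PySem.Dict Int String × Int) (kv : List Char × Int) :
    PySem.Dict String Int × PySem.Dict Int String × Int :=
  if s.2.2 < max_words then
    (s.1.insert (String.ofList kv.1) s.2.2, s.2.1.insert s.2.2 (String.ofList kv.1), s.2.2 + 1)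
  else s

def text_tokenizer (text : String) (max_words : Int) (reserve : Int) :
    (List (String × Int)) × (List (Int × String)) :=
  -- text.translate(str.maketrans('', '', punc)) deletes the chars of punc: exact as a filter on code points
  let ws0 : List Char := text.toList.filter (fun c => !(pvPuncA.toList.contains c))
  let ws1 : List Char := PySem.Chars.replace ws0 ['\n'] [' ']
  -- .split(' '); each piece is a str, so 'isinstance(word, str)' is always true
  let words : List (List Char) := PySem.Chars.splitOn ws1 [' ']
  let freq : PySem.Dict (List Char) Int := words.foldl pvStepA PySem.Dict.empty
  let freq_sorted := PySem.List.sorted2 freq.items (fun kv => kv.2) (fun kv => kv.1) true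
  let st := freq_sorted.foldl (pvAssignA max_words) (PySem.Dict.empty, PySem.Dict.empty, reserve)
  (st.1.items, st.2.1.items)

-- ===== PORT B =====
-- drop = set(string.punctuation) - {'<', '>'}
def pvDrop : PySem.Set Char := PySem.Set.diff (PySem.Set.ofList pvPunc.toList) ['<', '>']

-- body of B's single streaming pass (state = (freq, buf))
def pvStepB (s : PySem.Dict (List Char) Int × List Char) (c : Char) :
    PySem.Dict (List Char) Int × List Char :=
  if PySem.Set.contains pvDrop c then s
  else if c = ' ' ∨ c = '\n' then (s.1.insert s.2 (s.1.getD s.2 0 + 1), [])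
  else (s.1, s.2 ++ [PySem.Chars.lowerChar c])

-- freq[w] = freq.get(w, 0) + 1
def pvFin (d : PySem.Dict (List Char) Int) (b : List Char) : PySem.Dict (List Char) Int :=
  d.insert b (d.getD b 0 + 1)

def text_tokenizer_alt (text : String) (max_words : Int) (reserve : Int) :
    (List (String × Int)) × (List (Int × String)) :=
  let st := text.toList.foldl pvStepB (PySem.Dict.empty, [])
  let freq := pvFin st.1 st.2
  let top0 := PySem.List.sorted2 freq.items (fun kv => kv.2) (fun kv => kv.1) true
  let top := PySem.List.slice top0 none (some (max 0 (max_words - reserve)))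
  let word2idx := (PySem.List.enumerate top 0).foldl
    (fun d p => d.insert (String.ofList p.2.1) (reserve + p.1)) PySem.Dict.empty
  let idx2word := (PySem.List.enumerate top 0).foldl
    (fun d p => d.insert (reserve + p.1) (String.ofList p.2.1)) PySem.Dict.empty
  (word2idx.items, idx2word.items)

-- ===== PRECONDITION & SPEC =====
def Spec_text_tokenizer (text : String) (max_words : Int) (reserve : Int) (out : (List (String × Int)) × (List (Int × String))) : Prop := out = text_tokenizer_alt text max_words reserve
instance (text : String) (max_words : Int) (reserve : Int) (out : (List (String × Int)) × (List (Int × String))) : Decidable (Spec_text_tokenizer text max_words reserve out) := by unfold Spec_text_tokenizer; infer_instance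

-- ===== CLAIM (what is proved, stated in full; the proofs are below) =====
def Claim_equal_text_tokenizer : Prop := ∀ (text : String) (max_words : Int) (reserve : Int), Dom_text_tokenizer text max_words reserve → Spec_text_tokenizer text max_words reserve (text_tokenizer text max_words reserve)

-- ===== LEMMAS AND PROOFS =====

-- '\n' → ' ' on one char
def pvNl (c : Char) : Char := if c = '\n' then ' ' else c

-- what A's translate+replace produce, as one cleaned char list
def pvClean (cs : List Char) : List Char :=
  (cs.filter (fun c => !(PySem.Set.contains pvDrop c))).map pvNl

-- specification of split(' '): pieces of l, with pre the (already read) current piece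
def pvPieces (pre : List Char) : List Char → List (List Char)
  | [] => [pre]
  | c :: t => if c = ' ' then pre :: pvPieces [] t else pvPieces (pre ++ [c]) t

lemma pvPuncA_toList : pvPuncA.toList = (pvDrop : List Char) := by decide

lemma pv_go_spec : ∀ (fuel : Nat) (l cur : List Char) (acc : List (List Char)),
    l.length ≤ fuel →
    PySem.Chars.splitOn.go [' '] fuel l cur acc = acc.reverse ++ pvPieces cur.reverse l := by
  intro fuel
  induction fuel with
  | zero =>
      intro l cur acc h
      have hl : l = [] := by cases l <;> simp_all
      subst hl
      simp [PySem.Chars.splitOn.go, pvPieces]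
  | succ n ih =>
      intro l cur acc h
      cases l with
      | nil => simp [PySem.Chars.splitOn.go, pvPieces]
      | cons c rest =>
          by_cases hc : c = ' '
          · subst hc
            have hp : List.isPrefixOf [' '] (' ' :: rest) = true := by
              simp [List.isPrefixOf]
            have hstep : PySem.Chars.splitOn.go [' '] (n + 1) (' ' :: rest) cur acc
                = PySem.Chars.splitOn.go [' '] n rest [] (cur.reverse :: acc) := by
              simp [PySem.Chars.splitOn.go, hp]
            rw [hstep, ih rest [] (cur.reverse :: acc) (by simpa using h)]
            simp [pvPieces]
          · have hp : List.isPrefixOf [' '] (c :: rest) = false := by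
              simp [List.isPrefixOf]
              exact fun h' => hc h'.symm
            have hstep : PySem.Chars.splitOn.go [' '] (n + 1) (c :: rest) cur acc
                = PySem.Chars.splitOn.go [' '] n rest (c :: cur) acc := by
              simp [PySem.Chars.splitOn.go, hp]
            rw [hstep, ih rest (c :: cur) acc (by simpa using Nat.le_of_succ_le_succ h)]
            simp [pvPieces, hc]

lemma pv_splitOn_eq (l : List Char) :
    PySem.Chars.splitOn l [' '] = pvPieces [] l := by
  unfold PySem.Chars.splitOn
  rw [pv_go_spec (l.length + 1) l [] [] (by omega)]
  simp

lemma pv_replace_go_spec : ∀ (fuel : Nat) (l acc : List Char), l.length ≤ fuel →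
    PySem.Chars.replace.go ['\n'] [' '] fuel l acc = acc.reverse ++ l.map pvNl := by
  intro fuel
  induction fuel with
  | zero =>
      intro l acc h
      have hl : l = [] := by cases l <;> simp_all
      subst hl
      simp [PySem.Chars.replace.go]
  | succ n ih =>
      intro l acc h
      cases l with
      | nil => simp [PySem.Chars.replace.go]
      | cons c rest =>
          by_cases hc : c = '\n'
          · subst hc
            have hp : List.isPrefixOf ['\n'] ('\n' :: rest) = true := by
              simp [List.isPrefixOf]
            have hstep : PySem.Chars.replace.go ['\n'] [' '] (n + 1) ('\n' :: rest) acc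
                = PySem.Chars.replace.go ['\n'] [' '] n rest (' ' :: acc) := by
              simp [PySem.Chars.replace.go, hp]
            rw [hstep, ih rest (' ' :: acc) (by simpa using h)]
            simp [pvNl]
          · have hp : List.isPrefixOf ['\n'] (c :: rest) = false := by
              simp [List.isPrefixOf]
              exact fun h' => hc h'.symm
            have hstep : PySem.Chars.replace.go ['\n'] [' '] (n + 1) (c :: rest) acc
                = PySem.Chars.replace.go ['\n'] [' '] n rest (c :: acc) := by
              simp [PySem.Chars.replace.go, hp]
            rw [hstep, ih rest (c :: acc) (by simpa using Nat.le_of_succ_le_succ h)]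
            simp [pvNl, hc]

lemma pv_replace_eq (l : List Char) :
    PySem.Chars.replace l ['\n'] [' '] = l.map pvNl := by
  unfold PySem.Chars.replace
  rw [if_neg (by simp)]
  rw [pv_replace_go_spec l.length l [] (le_refl _)]
  simp

lemma pv_stepA_eq (d : PySem.Dict (List Char) Int) (w : List Char) :
    pvStepA d w = pvFin d (PySem.Chars.lower w) := by
  unfold pvStepA pvFin
  by_cases h : d.contains (PySem.Chars.lower w)
  · simp [h]
  · have h' : d.contains (PySem.Chars.lower w) = false := by simpa using h
    rw [if_neg (by simp [h']), PySem.Dict.getD_of_not_contains d 0 h']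
    norm_num

-- the streaming pass computes the word-fold over the split pieces
lemma pv_loop1 : ∀ (cs : List Char) (pre : List Char) (d : PySem.Dict (List Char) Int),
    pvFin (cs.foldl pvStepB (d, pre.map PySem.Chars.lowerChar)).1
        (cs.foldl pvStepB (d, pre.map PySem.Chars.lowerChar)).2
      = (pvPieces pre (pvClean cs)).foldl (fun d w => pvFin d (PySem.Chars.lower w)) d := by
  intro cs
  induction cs with
  | nil =>
      intro pre d
      simp [pvClean, pvPieces, PySem.Chars.lower]
  | cons c t ih =>
      intro pre d
      by_cases hdrop : PySem.Set.contains pvDrop c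
      · have hmem : c ∈ pvDrop := by simpa using hdrop
        have hclean : pvClean (c :: t) = pvClean t := by
          simp [pvClean, hmem]
        have hstep : pvStepB (d, pre.map PySem.Chars.lowerChar) c
            = (d, pre.map PySem.Chars.lowerChar) := by
          simp [pvStepB, hmem]
        rw [hclean, List.foldl_cons, hstep]
        exact ih pre d
      · have hmem : c ∉ pvDrop := by simpa using hdrop
        by_cases hsep : c = ' ' ∨ c = '\n'
        · have hnl : pvNl c = ' ' := by
            rcases hsep with h | h <;> simp [pvNl, h]
          have hclean : pvClean (c :: t) = ' ' :: pvClean t := by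
            simp [pvClean, hmem, hnl]
          have hstep : pvStepB (d, pre.map PySem.Chars.lowerChar) c
              = (pvFin d (pre.map PySem.Chars.lowerChar), []) := by
            simp [pvStepB, hmem, hsep, pvFin]
          rw [hclean, List.foldl_cons, hstep]
          show _ = List.foldl _ _ (pvPieces pre (' ' :: pvClean t))
          rw [show pvPieces pre (' ' :: pvClean t) = pre :: pvPieces [] (pvClean t) from by
            simp [pvPieces]]
          rw [List.foldl_cons]
          have := ih [] (pvFin d (pre.map PySem.Chars.lowerChar))
          simp only [List.map_nil] at this
          rw [this]
          rfl
        · have hcs : ¬ c = ' ' := fun h => hsep (Or.inl h)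
          have hcn : ¬ c = '\n' := fun h => hsep (Or.inr h)
          have hnl : pvNl c = c := by simp [pvNl, hcn]
          have hclean : pvClean (c :: t) = c :: pvClean t := by
            simp [pvClean, hmem, hnl]
          have hstep : pvStepB (d, pre.map PySem.Chars.lowerChar) c
              = (d, (pre ++ [c]).map PySem.Chars.lowerChar) := by
            simp [pvStepB, hmem, hcs, hcn]
          rw [hclean, List.foldl_cons, hstep]
          rw [show pvPieces pre (c :: pvClean t) = pvPieces (pre ++ [c]) (pvClean t) from by
            simp [pvPieces, hcs]]
          exact ih (pre ++ [c]) d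

-- A's guarded counter loop is the enumerate-fold over the truncated list
lemma pv_assign_spec (mw : Int) : ∀ (L : List (List Char × Int)) (c : Int)
    (D1 : PySem.Dict String Int) (D2 : PySem.Dict Int String),
    L.foldl (pvAssignA mw) (D1, D2, c) =
      ((PySem.List.enumerate (L.take (mw - c).toNat) c).foldl
          (fun d p => d.insert (String.ofList p.2.1) p.1) D1,
       (PySem.List.enumerate (L.take (mw - c).toNat) c).foldl
          (fun d p => d.insert p.1 (String.ofList p.2.1)) D2,
       c + ((L.take (mw - c).toNat).length : Int)) := by
  intro L
  induction L with
  | nil =>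
      intro c D1 D2
      simp [PySem.List.enumerate_nil]
  | cons x t ih =>
      intro c D1 D2
      by_cases hc : c < mw
      · have hn : (mw - c).toNat = (mw - (c + 1)).toNat + 1 := by omega
        rw [hn]
        simp only [List.foldl_cons, pvAssignA, if_pos hc, List.take_succ_cons,
          PySem.List.enumerate_cons, List.length_cons]
        rw [ih (c + 1) (D1.insert (String.ofList x.1) c) (D2.insert c (String.ofList x.1))]
        refine Prod.ext rfl (Prod.ext rfl ?_)
        push_cast
        ring
      · have hn : (mw - c).toNat = 0 := by omega
        rw [hn]
        simp only [List.take_zero, PySem.List.enumerate_nil, List.foldl_nil, List.length_nil,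
          List.foldl_cons, pvAssignA, if_neg hc]
        have := ih c D1 D2
        rw [hn] at this
        simpa using this

-- shifting the start of an enumerate-fold
lemma pv_enum_shift {α β : Type} (xs : List α) (s : Int) (d : β) (g : β → Int → α → β) :
    (PySem.List.enumerate xs s).foldl (fun d p => g d p.1 p.2) d
      = (PySem.List.enumerate xs 0).foldl (fun d p => g d (s + p.1) p.2) d := by
  rw [PySem.List.enumerate_eq_zipIdx_map, PySem.List.enumerate_eq_zipIdx_map, List.foldl_map,
    List.foldl_map]
  apply PySem.List.foldl_congr_mem
  intro acc x hx
  simp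

-- ===== VERDICT (by name: the statement is the Claim_ definition above) =====
theorem text_tokenizer_spec : Claim_equal_text_tokenizer := by
  intro text max_words reserve _
  unfold Spec_text_tokenizer text_tokenizer text_tokenizer_alt
  -- stage 1: the two frequency dicts are equal
  have hpred : (fun c => !(pvPuncA.toList.contains c))
      = (fun c => !(PySem.Set.contains pvDrop c)) := by
    funext c
    rw [pvPuncA_toList, PySem.Set.contains_eq_listContains]
  have hfreq :
      (PySem.Chars.splitOn
          (PySem.Chars.replace (text.toList.filter (fun c => !(pvPuncA.toList.contains c)))
            ['\n'] [' ']) [' ']).foldl pvStepA PySem.Dict.empty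
        = pvFin (text.toList.foldl pvStepB (PySem.Dict.empty, ([] : List Char))).1
            (text.toList.foldl pvStepB (PySem.Dict.empty, ([] : List Char))).2 := by
    rw [pv_replace_eq, pv_splitOn_eq, hpred]
    have hA : ∀ (l : List (List Char)) (d : PySem.Dict (List Char) Int),
        l.foldl pvStepA d = l.foldl (fun d w => pvFin d (PySem.Chars.lower w)) d := by
      intro l d
      exact PySem.List.foldl_congr_mem l _ _ d (fun acc x _ => pv_stepA_eq acc x)
    rw [hA]
    have := pv_loop1 text.toList [] PySem.Dict.empty
    simp only [List.map_nil] at this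
    exact this.symm
  simp only [hfreq]
  -- stage 2: the guarded counter loop equals the slice-and-enumerate folds
  set L := PySem.List.sorted2
      (pvFin (text.toList.foldl pvStepB (PySem.Dict.empty, ([] : List Char))).1
        (text.toList.foldl pvStepB (PySem.Dict.empty, ([] : List Char))).2).items
      (fun kv => kv.2) (fun kv => kv.1) true with hL
  have hslice : PySem.List.slice L none (some (max 0 (max_words - reserve)))
      = L.take (max_words - reserve).toNat := by
    rw [PySem.List.slice_to L (le_max_left 0 (max_words - reserve))]
    congr 1
    omega
  rw [pv_assign_spec max_words L reserve PySem.Dict.empty PySem.Dict.empty, hslice]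
  refine Prod.ext ?_ ?_
  · show ((PySem.List.enumerate (L.take (max_words - reserve).toNat) reserve).foldl
        (fun d p => d.insert (String.ofList p.2.1) p.1) PySem.Dict.empty).items = _
    rw [pv_enum_shift (L.take (max_words - reserve).toNat) reserve PySem.Dict.empty
      (fun d i w => d.insert (String.ofList w.1) i)]
  · show ((PySem.List.enumerate (L.take (max_words - reserve).toNat) reserve).foldl
        (fun d p => d.insert p.1 (String.ofList p.2.1)) PySem.Dict.empty).items = _
    rw [pv_enum_shift (L.take (max_words - reserve).toNat) reserve PySem.Dict.empty
      (fun d i w => d.insert i (String.ofList w.1))]
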